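-- pv_equiv track=rewrite | github.com/ChrisDavison/advent-of-code | 2024/day19.py | solve
-- ===== SOURCE A (Python) =====
-- def solve(towels, pattern, depth=0):
--     if len(pattern) == 1:
--         if pattern[0] in towels:
--             return True
--         return False
--     if pattern in towels:
--         return True
--     if pattern[0] in towels:
--         return solve(towels, pattern[1:], depth + 1)
--     return False
-- ===== SOURCE B (Python) =====
-- def solve(towels, pattern, depth=0):
--     while len(pattern) > 1:
--         if pattern in towels:
--             return True
--         if pattern[0] not in towels:
--             return False
--         pattern = pattern[1:]
--     return pattern in towels
-- ===== Notes on version B (the rewrite author's own statement) =====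
-- stated objective: simpler
-- what changed: Replaced the tail recursion by an iterative while loop that shaves one leading character per step, collapsing the two base cases into a single final membership test.
import Mathlib
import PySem

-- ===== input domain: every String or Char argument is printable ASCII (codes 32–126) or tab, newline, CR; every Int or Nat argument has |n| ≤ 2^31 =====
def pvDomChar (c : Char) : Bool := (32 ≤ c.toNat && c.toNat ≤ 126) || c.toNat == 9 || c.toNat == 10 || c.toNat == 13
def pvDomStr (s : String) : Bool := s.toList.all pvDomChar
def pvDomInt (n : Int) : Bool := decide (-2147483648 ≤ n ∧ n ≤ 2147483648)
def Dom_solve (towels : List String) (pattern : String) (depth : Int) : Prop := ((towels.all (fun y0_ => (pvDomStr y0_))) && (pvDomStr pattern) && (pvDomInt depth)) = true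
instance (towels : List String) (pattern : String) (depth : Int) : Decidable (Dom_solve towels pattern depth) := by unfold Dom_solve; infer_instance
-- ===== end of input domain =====

-- B replaces A's tail recursion by an iterative while loop (simpler decomposition, same cost);
-- where A raises IndexError (empty pattern, '' not in towels) B returns False — excluded by Pre_.

-- ===== PORT A =====
-- recursion over the pattern's character list, following A's branch order;
-- the [] case is Python's '' pattern: 'pattern in towels' may still return True,
-- otherwise pattern[0] raises IndexError (port returns false; excluded by Pre_solve)
def solveGoA (towels : List String) (p : List Char) (depth : Int) : Bool :=
  match p with
  | [] => if towels.contains (String.mk []) then true else false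
  | [c] => if towels.contains (String.mk [c]) then true else false
  | c :: rest =>
      if towels.contains (String.mk (c :: rest)) then true
      else if towels.contains (String.mk [c]) then solveGoA towels rest (depth + 1)
      else false

def solve (towels : List String) (pattern : String) (depth : Int) : Bool :=
  solveGoA towels pattern.toList depth

-- ===== PORT B =====
-- the while loop of Source B: while len(pattern) > 1 strip one character; then 'pattern in towels'
def solveGoB (towels : List String) (p : List Char) : Bool :=
  if p.length > 1 then
    if towels.contains (String.mk p) then true
    else if towels.contains (String.mk (p.take 1)) then solveGoB towels p.tail
    else false
  else towels.contains (String.mk p)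
termination_by p.length

def solve_alt (towels : List String) (pattern : String) (depth : Int) : Bool :=
  solveGoB towels pattern.toList

-- ===== PRECONDITION & SPEC =====
-- Pre_ excludes only the inputs where A raises IndexError: empty pattern with '' not among the towels.
def Pre_solve (towels : List String) (pattern : String) (depth : Int) : Prop :=
  pattern ≠ "" ∨ towels.contains "" = true
instance (towels : List String) (pattern : String) (depth : Int) : Decidable (Pre_solve towels pattern depth) := by unfold Pre_solve; infer_instance

def pvWitness_solve : List String × String × Int := (["a", "b", "ab"], "ab", 0)

def Spec_solve (towels : List String) (pattern : String) (depth : Int) (out : Bool) : Prop := out = solve_alt towels pattern depth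
instance (towels : List String) (pattern : String) (depth : Int) (out : Bool) : Decidable (Spec_solve towels pattern depth out) := by unfold Spec_solve; infer_instance

-- ===== CLAIM (what is proved, stated in full; the proofs are below) =====
def Claim_equal_solve : Prop := ∀ (towels : List String) (pattern : String) (depth : Int), Dom_solve towels pattern depth → Pre_solve towels pattern depth → Spec_solve towels pattern depth (solve towels pattern depth)

-- ===== LEMMAS AND PROOFS =====
lemma goA_eq_goB (towels : List String) :
    ∀ (p : List Char) (depth : Int), p ≠ [] → solveGoA towels p depth = solveGoB towels p := by
  intro p
  induction p with
  | nil => intro d h; exact absurd rfl h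
  | cons c rest ih =>
    intro d _
    cases rest with
    | nil =>
      simp [solveGoA, solveGoB]
    | cons c2 rest2 =>
      rw [solveGoA, solveGoB, if_pos (by simp : (c :: c2 :: rest2).length > 1)]
      simp only [List.take_succ_cons, List.take_zero, List.tail_cons]
      have hne : (c2 :: rest2 : List Char) ≠ [] := by simp
      rw [ih (d + 1) hne]
      simp

-- ===== VERDICT (by name: the statement is the Claim_ definition above) =====
theorem solve_spec : Claim_equal_solve := by
  intro towels pattern depth _ hpre
  unfold Spec_solve solve solve_alt
  by_cases hp : pattern.toList = []
  · have hs : pattern = "" := by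
      cases pattern; simp_all
    subst hs
    rcases hpre with h | h
    · exact absurd rfl h
    · rw [hp]
      simp [solveGoA, solveGoB]
  · exact goA_eq_goB towels pattern.toList depth hp
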